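-- pv_equiv track=rewrite | github.com/joangoma/Jocs-amb-python | MineSweaper/main.py | minaProp
-- ===== SOURCE A (Python) =====
-- def minaProp(x, y, x1, y1):
--     num = 0
--     l = [(0, 1), (0, -1), (1, 0), (-1, 0), (1, 1), (1, -1), (-1, -1), (-1, 1), (0, 0)]
--     x2, y2 = x, y
--     for e in l:
--         x2, y2 = x + e[0], y + e[1]
--         if x2 == x1 and y2 == y1: return True
--
--     return False
-- ===== SOURCE B (Python) =====
-- def minaProp(x, y, x1, y1):
--     return (x1 - x) in (-1, 0, 1) and (y1 - y) in (-1, 0, 1)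
-- ===== Notes on version B (the rewrite author's own statement) =====
-- stated objective: simpler
-- what changed: Replaced the loop over the 9 offset tuples with a direct closed-form check that the coordinate differences are each in (-1,0,1).
import Mathlib
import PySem

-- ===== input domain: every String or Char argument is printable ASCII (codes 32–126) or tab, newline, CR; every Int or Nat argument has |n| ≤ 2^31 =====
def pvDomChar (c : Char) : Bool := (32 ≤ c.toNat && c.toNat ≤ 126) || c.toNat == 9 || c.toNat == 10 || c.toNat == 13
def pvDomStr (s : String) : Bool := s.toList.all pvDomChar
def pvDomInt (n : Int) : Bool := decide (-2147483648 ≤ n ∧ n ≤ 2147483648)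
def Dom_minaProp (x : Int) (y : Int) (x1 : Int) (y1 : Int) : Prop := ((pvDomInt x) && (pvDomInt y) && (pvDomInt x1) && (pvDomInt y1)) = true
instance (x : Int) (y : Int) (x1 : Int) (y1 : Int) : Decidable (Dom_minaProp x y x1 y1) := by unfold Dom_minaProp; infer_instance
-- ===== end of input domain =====

-- ===== PORT A =====
-- B replaces the loop over 9 offsets with a closed-form membership test on the differences (simpler).
-- loop over l: return True on first matching offset, else False
def minaPropLoop (x : Int) (y : Int) (x1 : Int) (y1 : Int) : List (Int × Int) → Bool
  | [] => false
  | e :: rest =>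
    if x + e.1 = x1 ∧ y + e.2 = y1 then true
    else minaPropLoop x y x1 y1 rest

def minaProp (x : Int) (y : Int) (x1 : Int) (y1 : Int) : Bool :=
  minaPropLoop x y x1 y1 [(0, 1), (0, -1), (1, 0), (-1, 0), (1, 1), (1, -1), (-1, -1), (-1, 1), (0, 0)]

-- ===== PORT B =====
def minaProp_alt (x : Int) (y : Int) (x1 : Int) (y1 : Int) : Bool :=
  ((x1 - x == -1) || (x1 - x == 0) || (x1 - x == 1)) &&
  ((y1 - y == -1) || (y1 - y == 0) || (y1 - y == 1))

-- ===== PRECONDITION & SPEC =====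
def Spec_minaProp (x : Int) (y : Int) (x1 : Int) (y1 : Int) (out : Bool) : Prop := out = minaProp_alt x y x1 y1
instance (x : Int) (y : Int) (x1 : Int) (y1 : Int) (out : Bool) : Decidable (Spec_minaProp x y x1 y1 out) := by unfold Spec_minaProp; infer_instance

-- ===== CLAIM (what is proved, stated in full; the proofs are below) =====
def Claim_equal_minaProp : Prop := ∀ (x : Int) (y : Int) (x1 : Int) (y1 : Int), Dom_minaProp x y x1 y1 → Spec_minaProp x y x1 y1 (minaProp x y x1 y1)

-- ===== LEMMAS AND PROOFS =====
theorem minaPropLoop_iff (x y x1 y1 : Int) (l : List (Int × Int)) :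
    minaPropLoop x y x1 y1 l = true ↔ ∃ e ∈ l, x + e.1 = x1 ∧ y + e.2 = y1 := by
  induction l with
  | nil => simp [minaPropLoop]
  | cons e rest ih =>
    rw [minaPropLoop]
    split_ifs with h
    · simp [h]
    · simp only [ih, List.exists_mem_cons_iff]
      tauto

-- ===== VERDICT (by name: the statement is the Claim_ definition above) =====
theorem minaProp_spec : Claim_equal_minaProp := by
  intro x y x1 y1 _
  unfold Spec_minaProp
  rw [Bool.eq_iff_iff]
  simp only [minaProp, minaProp_alt, minaPropLoop_iff, List.exists_mem_cons_iff,
    List.not_mem_nil, false_and, exists_false, or_false, Bool.and_eq_true,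
    Bool.or_eq_true, beq_iff_eq]
  omega
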